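-- pv_equiv track=rewrite | github.com/omegalabsinc/omegalabs-anytoany-bittensor | models/tokenizer.py | _split_long_repetitions
-- ===== SOURCE A (Python) =====
-- from typing import Iterator
--
-- def _split_long_repetitions(s: str, max_consecutive_slice_len: int) -> Iterator[str]:
--     """
--     Split the string `s` so that each substring contains no more than `max_consecutive_slice_len`
--     consecutive whitespaces or consecutive non-whitespaces
--     """
--     current_slice_len = 0
--     current_slice_is_space = s[0].isspace() if len(s) > 0 else False
--     slice_start = 0
--
--     for i in range(len(s)):
--         is_now_space = s[i].isspace()
--
--         if current_slice_is_space ^ is_now_space: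
--             current_slice_len = 1
--             current_slice_is_space = is_now_space
--         else:
--             current_slice_len += 1
--             if current_slice_len > max_consecutive_slice_len:
--                 yield s[slice_start:i]
--                 slice_start = i
--                 current_slice_len = 1
--     yield s[slice_start:]
-- ===== SOURCE B (Python) =====
-- from typing import Iterator
--
-- def _split_long_repetitions(s: str, max_consecutive_slice_len: int) -> Iterator[str]:
--     """Two-pass version: first collect the cut indices (one arithmetic range per
--     maximal same-is-space run), then emit the slices between consecutive cuts."""
--     if not s:
--         yield ""
--         return
--     cuts = []
--     run_start = 0
--     for i in range(1, len(s)):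
--         if s[i].isspace() != s[run_start].isspace():
--             cuts.extend(range(run_start + max_consecutive_slice_len, i, max_consecutive_slice_len))
--             run_start = i
--     cuts.extend(range(run_start + max_consecutive_slice_len, len(s), max_consecutive_slice_len))
--     prev = 0
--     for c in cuts:
--         yield s[prev:c]
--         prev = c
--     yield s[prev:]
-- ===== Notes on version B (the rewrite author's own statement) =====
-- stated objective: alternative
-- what changed: A's single-pass state machine (run length / is-space / slice-start updated per character, yielding as it goes) is replaced by two separate passes: first collect all cut indices as one arithmetic range per maximal same-is-space run, then emit the slices between consecutive cuts.
-- intended difference: For max_consecutive_slice_len < 0 on a nonempty string A returns a per-character split with a spurious leading empty piece (leftover loop-state artifact, e.g. ['', 'a', 'b'] for 'ab'); B returns the whole string ['ab'], the intended value for an unsatisfiable negative limit. — e.g. on _split_long_repetitions("ab", -1): A returns ["", "a", "b"], B returns ["ab"]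
-- outside the precondition, e.g. on _split_long_repetitions('ab', 0): A returns ['', 'a', 'b'], B raises ValueError
import Mathlib
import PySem

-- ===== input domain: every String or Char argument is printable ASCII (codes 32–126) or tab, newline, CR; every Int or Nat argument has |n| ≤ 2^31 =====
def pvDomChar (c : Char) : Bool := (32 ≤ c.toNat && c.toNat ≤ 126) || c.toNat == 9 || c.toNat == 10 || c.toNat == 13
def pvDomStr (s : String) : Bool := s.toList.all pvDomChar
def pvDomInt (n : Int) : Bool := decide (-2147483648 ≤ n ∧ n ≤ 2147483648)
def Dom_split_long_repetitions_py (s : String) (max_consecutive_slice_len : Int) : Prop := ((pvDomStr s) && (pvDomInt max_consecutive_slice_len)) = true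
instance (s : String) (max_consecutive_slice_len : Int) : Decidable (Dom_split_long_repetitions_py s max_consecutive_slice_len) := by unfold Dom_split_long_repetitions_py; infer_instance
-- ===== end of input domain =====

-- B replaces A's single-pass state machine by two passes (collect cut indices per
-- same-is-space run, then emit the slices between consecutive cuts); objective: alternative.
-- For negative max_consecutive_slice_len (D_ below) B returns the whole string while A
-- returns an accidental per-character split with a leading empty piece.


-- ===== PORT A =====
def split_long_repetitions_py (s : String) (max_consecutive_slice_len : Int) : List String :=
  let cs := s.toList
  let n : Int := cs.length
  let init : Int × Bool × Int × List String :=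
    (0, (if n > 0 then PySem.Chars.isspace (PySem.List.pyGetD cs 0 ' ') else false), 0, [])
  let fin := (PySem.List.pyRange 0 n 1).foldl (fun st i =>
      let isNowSpace := PySem.Chars.isspace (PySem.List.pyGetD cs i ' ')
      if xor st.2.1 isNowSpace then
        (1, isNowSpace, st.2.2.1, st.2.2.2)
      else
        let len := st.1 + 1
        if len > max_consecutive_slice_len then
          (1, isNowSpace, i, st.2.2.2 ++ [String.ofList (PySem.List.slice cs (some st.2.2.1) (some i))])
        else (len, isNowSpace, st.2.2.1, st.2.2.2)) init
  fin.2.2.2 ++ [String.ofList (PySem.List.slice cs (some fin.2.2.1) none)]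

-- ===== PORT B =====
def split_long_repetitions_py_alt (s : String) (max_consecutive_slice_len : Int) : List String :=
  let cs := s.toList
  if cs.isEmpty then [""] else
  let n : Int := cs.length
  let p1 := (PySem.List.pyRange 1 n 1).foldl (fun (st : List Int × Int) i =>
      if PySem.Chars.isspace (PySem.List.pyGetD cs i ' ')
          != PySem.Chars.isspace (PySem.List.pyGetD cs st.2 ' ') then
        (st.1 ++ PySem.List.pyRange (st.2 + max_consecutive_slice_len) i max_consecutive_slice_len, i)
      else st) ([], 0)
  let cuts := p1.1 ++ PySem.List.pyRange (p1.2 + max_consecutive_slice_len) n max_consecutive_slice_len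
  let p2 := cuts.foldl (fun (st : List String × Int) c =>
      (st.1 ++ [String.ofList (PySem.List.slice cs (some st.2) (some c))], c)) ([], 0)
  p2.1 ++ [String.ofList (PySem.List.slice cs (some p2.2) none)]

-- ===== PRECONDITION & SPEC =====
-- Pre_ excludes max_consecutive_slice_len = 0 on nonempty strings: A returns an accidental
-- per-character split there (run length 0 is unsatisfiable) while B's range(step=0) raises ValueError.
def Pre_split_long_repetitions_py (s : String) (max_consecutive_slice_len : Int) : Prop :=
  max_consecutive_slice_len ≠ 0 ∨ s.toList = []
instance (s : String) (max_consecutive_slice_len : Int) : Decidable (Pre_split_long_repetitions_py s max_consecutive_slice_len) := by unfold Pre_split_long_repetitions_py; infer_instance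

def pvWitness_split_long_repetitions_py : String × Int := ("ab cc", 2)

-- On negative max_consecutive_slice_len and a nonempty string A returns a per-character split
-- with a spurious leading empty piece (leftover loop-state artifact); B treats the unsatisfiable
-- negative limit as no cutting and returns the whole string, the intended value.
def D_split_long_repetitions_py (s : String) (max_consecutive_slice_len : Int) : Prop :=
  max_consecutive_slice_len < 0 ∧ s.toList ≠ []
instance (s : String) (max_consecutive_slice_len : Int) : Decidable (D_split_long_repetitions_py s max_consecutive_slice_len) := by unfold D_split_long_repetitions_py; infer_instance

def Spec_split_long_repetitions_py (s : String) (max_consecutive_slice_len : Int) (out : List String) : Prop :=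
  ¬ D_split_long_repetitions_py s max_consecutive_slice_len → out = split_long_repetitions_py_alt s max_consecutive_slice_len
instance (s : String) (max_consecutive_slice_len : Int) (out : List String) : Decidable (Spec_split_long_repetitions_py s max_consecutive_slice_len out) := by unfold Spec_split_long_repetitions_py; infer_instance

def pvDiffWitness_split_long_repetitions_py : String × Int := ("ab", -1)
def pvDiffWitnessOut_split_long_repetitions_py : (List String) × (List String) := (["", "a", "b"], ["ab"])

-- ===== CLAIM (what is proved, stated in full; the proofs are below) =====
def Claim_unchanged_split_long_repetitions_py : Prop := ∀ (s : String) (max_consecutive_slice_len : Int), Dom_split_long_repetitions_py s max_consecutive_slice_len → Pre_split_long_repetitions_py s max_consecutive_slice_len → Spec_split_long_repetitions_py s max_consecutive_slice_len (split_long_repetitions_py s max_consecutive_slice_len)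
def Claim_changed_split_long_repetitions_py : Prop := Dom_split_long_repetitions_py (pvDiffWitness_split_long_repetitions_py.1) (pvDiffWitness_split_long_repetitions_py.2) ∧ Pre_split_long_repetitions_py (pvDiffWitness_split_long_repetitions_py.1) (pvDiffWitness_split_long_repetitions_py.2) ∧ D_split_long_repetitions_py (pvDiffWitness_split_long_repetitions_py.1) (pvDiffWitness_split_long_repetitions_py.2) ∧ split_long_repetitions_py (pvDiffWitness_split_long_repetitions_py.1) (pvDiffWitness_split_long_repetitions_py.2) = pvDiffWitnessOut_split_long_repetitions_py.1 ∧ split_long_repetitions_py_alt (pvDiffWitness_split_long_repetitions_py.1) (pvDiffWitness_split_long_repetitions_py.2) = pvDiffWitnessOut_split_long_repetitions_py.2 ∧ pvDiffWitnessOut_split_long_repetitions_py.1 ≠ pvDiffWitnessOut_split_long_repetitions_py.2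
def Claim_exact_split_long_repetitions_py : Prop := ∀ (s : String) (max_consecutive_slice_len : Int), Dom_split_long_repetitions_py s max_consecutive_slice_len → Pre_split_long_repetitions_py s max_consecutive_slice_len → D_split_long_repetitions_py s max_consecutive_slice_len → split_long_repetitions_py s max_consecutive_slice_len ≠ split_long_repetitions_py_alt s max_consecutive_slice_len

-- ===== LEMMAS AND PROOFS =====

-- is-space type of character j (as both ports read it)
def pvTyp (cs : List Char) (j : Nat) : Bool := PySem.Chars.isspace (cs.getD j ' ')
def pvPiece (cs : List Char) (a b : Int) : String := String.ofList (PySem.List.slice cs (some a) (some b))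
def pvEnd (cs : List Char) (a : Int) : String := String.ofList (PySem.List.slice cs (some a) none)

def pvPieces (cs : List Char) : Int → List Int → List String
  | _, [] => []
  | prev, c :: rest => pvPiece cs prev c :: pvPieces cs c rest

-- A's loop, as structural recursion on the index
def pvARun (cs : List Char) (m : Int) (j : Nat) (len : Int) (isSp : Bool) (start : Int) (acc : List String) : List String :=
  if _h : j < cs.length then
    let nowSp := pvTyp cs j
    if xor isSp nowSp then pvARun cs m (j+1) 1 nowSp start acc
    else if len + 1 > m then pvARun cs m (j+1) 1 nowSp (j : Int) (acc ++ [pvPiece cs start (j : Int)])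
    else pvARun cs m (j+1) (len+1) nowSp start acc
  else acc ++ [pvEnd cs start]
termination_by cs.length - j

-- B's first pass (relative: cuts accumulated so far dropped), as structural recursion
def pvBCuts (cs : List Char) (m : Int) (j rs : Nat) : List Int :=
  if _h : j < cs.length then
    if pvTyp cs j != pvTyp cs rs then
      PySem.List.pyRange ((rs : Int) + m) (j : Int) m ++ pvBCuts cs m (j+1) j
    else pvBCuts cs m (j+1) rs
  else PySem.List.pyRange ((rs : Int) + m) (cs.length : Int) m
termination_by cs.length - j

-- A's future cut positions from index j, given the last cut/run-start position p
def pvFCuts (cs : List Char) (m : Int) (j : Nat) (p : Int) (t : Bool) : List Int :=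
  if _h : j < cs.length then
    if xor t (pvTyp cs j) then pvFCuts cs m (j+1) (j : Int) (pvTyp cs j)
    else if ((j : Int) - p) + 1 > m then (j : Int) :: pvFCuts cs m (j+1) (j : Int) t
    else pvFCuts cs m (j+1) p t
  else []
termination_by cs.length - j

-- closed form of a positive-step range whose element count is k
lemma pvPyRange_closed (a b m : Int) (hm : 0 < m) (k : Nat)
    (hlo : (k : Int) * m - m < b - a) (hhi : b - a ≤ (k : Int) * m) :
    PySem.List.pyRange a b m = (List.range k).map (fun i : Nat => a + m * (i : Int)) := by
  rw [PySem.List.pyRange_of_pos _ _ hm]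
  have hcount : (if a < b then ((b - a + m - 1) / m).toNat else 0) = k := by
    rcases Nat.eq_zero_or_pos k with hk | hk
    · subst hk
      simp only [Nat.cast_zero, zero_mul] at hhi
      rw [if_neg (by omega)]
    · have hab : a < b := by
        have h1 : (1 : Int) ≤ (k : Int) := by exact_mod_cast hk
        nlinarith
      rw [if_pos hab]
      have hdecomp : b - a + m - 1 = (b - a + m - 1 - (k : Int) * m) + (k : Int) * m := by ring
      rw [hdecomp, Int.add_mul_ediv_right _ _ (by omega : m ≠ 0),
          Int.ediv_eq_zero_of_lt (by omega) (by omega)]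
      omega
  rw [hcount]

lemma pvPyRange_nil (a b m : Int) (hm : 0 < m) (h : b ≤ a) : PySem.List.pyRange a b m = [] := by
  rw [PySem.List.pyRange_of_pos _ _ hm, if_neg (by omega)]
  simp

-- two stops in the same step window give the same range
lemma pvPyRange_eq_near (rs b p m : Int) (hm : 0 < m) (k : Nat)
    (hp : p = rs + (k : Int) * m) (h1 : p < b) (h2 : b ≤ p + m) :
    PySem.List.pyRange (rs + m) b m = PySem.List.pyRange (rs + m) (p + 1) m := by
  rw [pvPyRange_closed (rs + m) b m hm k (by omega) (by omega),
      pvPyRange_closed (rs + m) (p + 1) m hm k (by omega) (by omega)]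

lemma pvPyRange_snoc (rs p m : Int) (hm : 0 < m) (k : Nat) (hp : p = rs + (k : Int) * m) :
    PySem.List.pyRange (rs + m) (p + m + 1) m
      = PySem.List.pyRange (rs + m) (p + 1) m ++ [p + m] := by
  have hkk : ((k : Int) + 1) * m = (k : Int) * m + m := by ring
  rw [pvPyRange_closed (rs + m) (p + m + 1) m hm (k + 1) (by push_cast; omega) (by push_cast; omega),
      pvPyRange_closed (rs + m) (p + 1) m hm k (by omega) (by omega),
      List.range_succ, List.map_append, List.map_singleton]
  congr 2
  rw [hp]
  ring

lemma pvPieces_cons (cs : List Char) (prev c : Int) (rest : List Int) :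
    pvPieces cs prev (c :: rest) = pvPiece cs prev c :: pvPieces cs c rest := rfl

-- ===== bridging the ports to the recursions =====

lemma pvAfold (cs : List Char) (m : Int) :
    ∀ (fuel j : Nat), cs.length - j ≤ fuel → ∀ (len : Int) (isSp : Bool) (start : Int) (acc : List String),
    (let fin := (PySem.List.pyRange (j : Int) (cs.length : Int) 1).foldl (fun st i =>
        let isNowSpace := PySem.Chars.isspace (PySem.List.pyGetD cs i ' ')
        if xor st.2.1 isNowSpace then
          (1, isNowSpace, st.2.2.1, st.2.2.2)
        else
          let len := st.1 + 1
          if len > m then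
            (1, isNowSpace, i, st.2.2.2 ++ [String.ofList (PySem.List.slice cs (some st.2.2.1) (some i))])
          else (len, isNowSpace, st.2.2.1, st.2.2.2)) (len, isSp, start, acc)
     fin.2.2.2 ++ [String.ofList (PySem.List.slice cs (some fin.2.2.1) none)])
    = pvARun cs m j len isSp start acc := by
  intro fuel
  induction fuel with
  | zero =>
    intro j hj len isSp start acc
    have hj' : ¬ j < cs.length := by omega
    rw [PySem.List.pyRange_one_eq_nil (by exact_mod_cast Nat.le_of_not_lt hj')]
    rw [pvARun, dif_neg hj']
    rfl
  | succ fuel ih =>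
    intro j hj len isSp start acc
    by_cases h : j < cs.length
    · rw [PySem.List.pyRange_one_cons (by exact_mod_cast h), List.foldl_cons]
      rw [pvARun, dif_pos h]
      have hget : PySem.List.pyGetD cs (j : Int) ' ' = cs.getD j ' ' := PySem.List.pyGetD_natCast cs j ' '
      have hcast : ((j : Int) + 1) = ((j + 1 : Nat) : Int) := by push_cast; ring
      simp only [pvTyp, pvPiece, hget, hcast]
      by_cases hx : (isSp ^^ PySem.Chars.isspace (cs.getD j ' ')) = true
      · simp only [hx, if_true]
        exact ih (j + 1) (by omega) 1 (PySem.Chars.isspace (cs.getD j ' ')) start acc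
      · simp only [Bool.not_eq_true] at hx
        simp only [hx, Bool.false_eq_true, if_false]
        by_cases hc : len + 1 > m
        · rw [if_pos hc, if_pos hc]
          exact ih (j + 1) (by omega) 1 (PySem.Chars.isspace (cs.getD j ' ')) ((j : Nat) : Int)
            (acc ++ [String.ofList (PySem.List.slice cs (some start) (some ((j : Nat) : Int)))])
        · rw [if_neg hc, if_neg hc]
          exact ih (j + 1) (by omega) (len + 1) (PySem.Chars.isspace (cs.getD j ' ')) start acc
    · rw [PySem.List.pyRange_one_eq_nil (by exact_mod_cast Nat.le_of_not_lt h)]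
      rw [pvARun, dif_neg h]
      rfl

lemma pvA_eq_run (s : String) (m : Int) :
    split_long_repetitions_py s m
      = pvARun s.toList m 0 0
          (if (s.toList.length : Int) > 0 then pvTyp s.toList 0 else false) 0 [] := by
  have h := pvAfold s.toList m (s.toList.length) 0 (by omega) 0
      (if (s.toList.length : Int) > 0 then pvTyp s.toList 0 else false) 0 []
  simp only [Nat.cast_zero] at h
  unfold split_long_repetitions_py
  simp only [pvTyp] at h ⊢
  have h0 : PySem.List.pyGetD s.toList (0 : Int) ' ' = s.toList.getD 0 ' ' := by
    have := PySem.List.pyGetD_natCast s.toList 0 ' '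
    simpa using this
  rw [h0]
  exact h

lemma pvBfold (cs : List Char) (m : Int) :
    ∀ (fuel j : Nat), cs.length - j ≤ fuel → ∀ (rs : Nat) (cuts : List Int),
    (let p1 := (PySem.List.pyRange (j : Int) (cs.length : Int) 1).foldl (fun (st : List Int × Int) i =>
        if PySem.Chars.isspace (PySem.List.pyGetD cs i ' ')
            != PySem.Chars.isspace (PySem.List.pyGetD cs st.2 ' ') then
          (st.1 ++ PySem.List.pyRange (st.2 + m) i m, i)
        else st) (cuts, (rs : Int))
     p1.1 ++ PySem.List.pyRange (p1.2 + m) (cs.length : Int) m)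
    = cuts ++ pvBCuts cs m j rs := by
  intro fuel
  induction fuel with
  | zero =>
    intro j hj rs cuts
    have hj' : ¬ j < cs.length := by omega
    rw [PySem.List.pyRange_one_eq_nil (by exact_mod_cast Nat.le_of_not_lt hj')]
    rw [pvBCuts, dif_neg hj']
    rfl
  | succ fuel ih =>
    intro j hj rs cuts
    by_cases h : j < cs.length
    · rw [PySem.List.pyRange_one_cons (by exact_mod_cast h), List.foldl_cons]
      rw [pvBCuts, dif_pos h]
      have hcast : ((j : Int) + 1) = ((j + 1 : Nat) : Int) := by push_cast; ring
      simp only [pvTyp, PySem.List.pyGetD_natCast, hcast]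
      by_cases hx : (PySem.Chars.isspace (cs.getD j ' ') != PySem.Chars.isspace (cs.getD rs ' ')) = true
      · simp only [hx, if_true]
        rw [ih (j + 1) (by omega) j (cuts ++ PySem.List.pyRange ((rs : Int) + m) ((j : Nat) : Int) m)]
        rw [List.append_assoc]
      · simp only [Bool.not_eq_true] at hx
        simp only [hx, Bool.false_eq_true, if_false]
        exact ih (j + 1) (by omega) rs cuts
    · rw [PySem.List.pyRange_one_eq_nil (by exact_mod_cast Nat.le_of_not_lt h)]
      rw [pvBCuts, dif_neg h]
      rfl

lemma pvPfold (cs : List Char) :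
    ∀ (cuts : List Int) (prev : Int) (out : List String),
    cuts.foldl (fun (st : List String × Int) c =>
        (st.1 ++ [String.ofList (PySem.List.slice cs (some st.2) (some c))], c)) (out, prev)
      = (out ++ pvPieces cs prev cuts, cuts.getLastD prev) := by
  intro cuts
  induction cuts with
  | nil => intro prev out; simp [pvPieces]
  | cons c rest ih =>
    intro prev out
    rw [List.foldl_cons, ih c, pvPieces_cons, List.getLastD_cons]
    simp [pvPiece]

lemma pvB_eq (s : String) (m : Int) (h : s.toList ≠ []) :
    split_long_repetitions_py_alt s m
      = pvPieces s.toList 0 (pvBCuts s.toList m 1 0)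
          ++ [pvEnd s.toList ((pvBCuts s.toList m 1 0).getLastD 0)] := by
  unfold split_long_repetitions_py_alt
  have hne : s.toList.isEmpty = false := by simpa [List.isEmpty_iff] using h
  simp only [hne, Bool.false_eq_true, if_false]
  have hb := pvBfold s.toList m (s.toList.length) 1 (by omega) 0 []
  simp only [Nat.cast_one, Nat.cast_zero, List.nil_append] at hb
  rw [hb, pvPfold]
  rfl

-- ===== the equivalence on the run structure =====

lemma pvMain1 (cs : List Char) (m : Int) (hm : 1 ≤ m) :
    ∀ (fuel j : Nat), cs.length - j ≤ fuel → ∀ (len : Int) (t : Bool) (start : Int) (acc : List String),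
    1 ≤ len → len ≤ m →
    pvARun cs m j len t start acc
      = acc ++ pvPieces cs start (pvFCuts cs m j ((j : Int) - len) t)
            ++ [pvEnd cs ((pvFCuts cs m j ((j : Int) - len) t).getLastD start)] := by
  intro fuel
  induction fuel with
  | zero =>
    intro j hj len t start acc h1 h2
    have hj' : ¬ j < cs.length := by omega
    rw [pvARun, dif_neg hj', pvFCuts, dif_neg hj']
    simp [pvPieces]
  | succ fuel ih =>
    intro j hj len t start acc h1 h2
    by_cases h : j < cs.length
    · rw [pvARun, dif_pos h, pvFCuts, dif_pos h]
      by_cases hx : (t ^^ pvTyp cs j) = true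
      · simp only [hx, if_true]
        have hrw := ih (j + 1) (by omega) 1 (pvTyp cs j) start acc (by omega) hm
        have hp : ((j + 1 : Nat) : Int) - 1 = ((j : Nat) : Int) := by push_cast; ring
        rw [hp] at hrw
        exact hrw
      · simp only [Bool.not_eq_true] at hx
        have ht : pvTyp cs j = t := by
          cases t <;> cases h' : pvTyp cs j <;> simp_all
        simp only [ht, Bool.xor_self, Bool.false_eq_true, if_false]
        by_cases hc : len + 1 > m
        · have hcut : ((j : Int) - ((j : Int) - len)) + 1 > m := by omega
          rw [if_pos hc, if_pos hcut]
          have hrw := ih (j + 1) (by omega) 1 t ((j : Nat) : Int)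
            (acc ++ [pvPiece cs start ((j : Nat) : Int)]) (by omega) hm
          have hp : ((j + 1 : Nat) : Int) - 1 = ((j : Nat) : Int) := by push_cast; ring
          rw [hp] at hrw
          rw [hrw, pvPieces_cons, List.getLastD_cons]
          simp [List.append_assoc]
        · have hnc : ¬ (((j : Int) - ((j : Int) - len)) + 1 > m) := by omega
          rw [if_neg hc, if_neg hnc]
          have hrw := ih (j + 1) (by omega) (len + 1) t start acc (by omega) (by omega)
          have hp : ((j + 1 : Nat) : Int) - (len + 1) = ((j : Nat) : Int) - len := by push_cast; ring
          rw [hp] at hrw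
          exact hrw
    · rw [pvARun, dif_neg h, pvFCuts, dif_neg h]
      simp [pvPieces]

lemma pvMain2 (cs : List Char) (m : Int) (hm : 1 ≤ m) :
    ∀ (fuel j : Nat), cs.length - j ≤ fuel → ∀ (rs : Nat) (p : Int) (k : Nat),
    j ≤ cs.length → rs < j →
    (∀ i, rs ≤ i → i < j → pvTyp cs i = pvTyp cs rs) →
    p = (rs : Int) + (k : Int) * m → (j : Int) - m ≤ p → p < (j : Int) →
    pvBCuts cs m j rs
      = PySem.List.pyRange ((rs : Int) + m) (p + 1) m ++ pvFCuts cs m j p (pvTyp cs rs) := by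
  intro fuel
  induction fuel with
  | zero =>
    intro j hj rs p k hjn hrs hrun hp hpl hpu
    have hj' : ¬ j < cs.length := by omega
    have hjeq : j = cs.length := by omega
    rw [pvBCuts, dif_neg hj', pvFCuts, dif_neg hj', List.append_nil, ← hjeq]
    exact pvPyRange_eq_near (rs : Int) (j : Int) p m (by omega) k hp hpu (by omega)
  | succ fuel ih =>
    intro j hj rs p k hjn hrs hrun hp hpl hpu
    by_cases h : j < cs.length
    · rw [pvBCuts, dif_pos h, pvFCuts, dif_pos h]
      by_cases hb : pvTyp cs j = pvTyp cs rs
      · -- same run continues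
        have hbne : (pvTyp cs j != pvTyp cs rs) = false := by simp [hb]
        have hxor : xor (pvTyp cs rs) (pvTyp cs j) = false := by simp [hb]
        simp only [hbne, Bool.false_eq_true, if_false, hxor]
        by_cases hc : ((j : Int) - p) + 1 > m
        · -- a cut at j
          have hjp : (j : Int) = p + m := by omega
          simp only [if_pos hc]
          have hrun' : ∀ i, rs ≤ i → i < j + 1 → pvTyp cs i = pvTyp cs rs := by
            intro i hi1 hi2
            rcases Nat.lt_or_ge i j with hlt | hge
            · exact hrun i hi1 hlt
            · have : i = j := by omega
              rw [this]; exact hb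
          have hfe : ((k : Int) + 1) * m = (k : Int) * m + m := by ring
          have := ih (j + 1) (by omega) rs (j : Int) (k + 1) (by omega) (by omega) hrun'
            (by push_cast; omega) (by push_cast; omega) (by push_cast; omega)
          rw [this]
          have hext : PySem.List.pyRange ((rs : Int) + m) ((j : Int) + 1) m
              = PySem.List.pyRange ((rs : Int) + m) (p + 1) m ++ [(j : Int)] := by
            rw [show ((j : Nat) : Int) = p + m from hjp]
            exact pvPyRange_snoc (rs : Int) p m (by omega) k hp
          rw [hext, List.append_assoc]
          rfl
        · -- no cut at j
          simp only [if_neg hc]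
          have hrun' : ∀ i, rs ≤ i → i < j + 1 → pvTyp cs i = pvTyp cs rs := by
            intro i hi1 hi2
            rcases Nat.lt_or_ge i j with hlt | hge
            · exact hrun i hi1 hlt
            · have : i = j := by omega
              rw [this]; exact hb
          exact ih (j + 1) (by omega) rs p k (by omega) (by omega) hrun' hp
            (by push_cast; omega) (by push_cast; omega)
      · -- run boundary at j
        have hbne : (pvTyp cs j != pvTyp cs rs) = true := by simp [hb]
        have hxor : xor (pvTyp cs rs) (pvTyp cs j) = true := by
          cases hrs' : pvTyp cs rs <;> cases hj' : pvTyp cs j <;> simp_all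
        simp only [hbne, if_true, hxor]
        have hrun' : ∀ i, j ≤ i → i < j + 1 → pvTyp cs i = pvTyp cs j := by
          intro i hi1 hi2
          have hij : i = j := by omega
          rw [hij]
        have hp' : ((j : Nat) : Int) = ((j : Nat) : Int) + ((0 : Nat) : Int) * m := by
          norm_num
        have := ih (j + 1) (by omega) j (j : Int) 0 (by omega) (by omega) hrun' hp'
          (by push_cast; omega) (by push_cast; omega)
        rw [this]
        have hnil : PySem.List.pyRange ((j : Int) + m) ((j : Int) + 1) m = [] :=
          pvPyRange_nil _ _ _ (by omega) (by omega)
        rw [hnil, List.nil_append]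
        have hpref : PySem.List.pyRange ((rs : Int) + m) ((j : Int)) m
            = PySem.List.pyRange ((rs : Int) + m) (p + 1) m :=
          pvPyRange_eq_near (rs : Int) (j : Int) p m (by omega) k hp hpu (by omega)
        rw [hpref]
    · have hjeq : j = cs.length := by omega
      rw [pvBCuts, dif_neg h, pvFCuts, dif_neg h, List.append_nil, ← hjeq]
      exact pvPyRange_eq_near (rs : Int) (j : Int) p m (by omega) k hp hpu (by omega)

-- the two ports agree on any nonempty string when the limit is positive
lemma pvEquivNonempty (s : String) (m : Int) (hm : 1 ≤ m) (h : s.toList ≠ []) :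
    split_long_repetitions_py s m = split_long_repetitions_py_alt s m := by
  set cs := s.toList with hcs
  have hlen : 0 < cs.length := List.length_pos_iff.mpr h
  have hA := pvA_eq_run s m
  rw [← hcs] at hA
  have hpos : ((cs.length : Int) > 0) := by exact_mod_cast hlen
  rw [if_pos hpos] at hA
  -- one step of A's loop at j = 0
  have hstep : pvARun cs m 0 0 (pvTyp cs 0) 0 [] = pvARun cs m 1 1 (pvTyp cs 0) 0 [] := by
    rw [pvARun, dif_pos hlen]
    have hx : xor (pvTyp cs 0) (pvTyp cs 0) = false := by simp
    simp only [hx, Bool.false_eq_true, if_false, zero_add]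
    rw [if_neg (by omega : ¬ (1 : Int) > m)]
  rw [hA, hstep]
  have h1 := pvMain1 cs m hm (cs.length) 1 (by omega) 1 (pvTyp cs 0) 0 [] (by omega) hm
  have hp0 : ((1 : Nat) : Int) - 1 = 0 := by norm_num
  rw [hp0] at h1
  have h2 := pvMain2 cs m hm (cs.length) 1 (by omega) 0 0 0 (by omega) (by omega)
    (by intro i h1 h2; have hi0 : i = 0 := (by omega); subst hi0; rfl)
    (by norm_num) (by omega) (by norm_num)
  simp only [Nat.cast_zero] at h2
  have hnil : PySem.List.pyRange ((0 : Int) + m) ((0 : Int) + 1) m = [] :=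
    pvPyRange_nil _ _ _ (by omega) (by omega)
  rw [hnil, List.nil_append] at h2
  rw [h1, ← h2, pvB_eq s m h, ← hcs]
  simp

lemma pvEmptyCase (s : String) (m : Int) (h : s.toList = []) :
    split_long_repetitions_py s m = split_long_repetitions_py_alt s m := by
  unfold split_long_repetitions_py split_long_repetitions_py_alt
  rw [h]
  simp only [List.length_nil, Nat.cast_zero, List.isEmpty_nil, if_true]
  rw [PySem.List.pyRange_one_eq_nil (by omega)]
  rfl

-- ===== lemmas for the tightness theorem (A ≠ B everywhere inside D_) =====

lemma pvPyRange_nil_neg (a b m : Int) (hm : m < 0) (h : a ≤ b) : PySem.List.pyRange a b m = [] := by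
  simp only [PySem.List.pyRange]
  rw [if_neg (by omega : ¬ m = 0), if_neg (by omega : ¬ 0 < m), if_neg (by omega : ¬ b < a)]
  simp

lemma pvARun_prefix (cs : List Char) (m : Int) :
    ∀ (fuel j : Nat), cs.length - j ≤ fuel → ∀ (len : Int) (isSp : Bool) (start : Int) (acc : List String),
    ∃ t, pvARun cs m j len isSp start acc = acc ++ t := by
  intro fuel
  induction fuel with
  | zero =>
    intro j hj len isSp start acc
    have hj' : ¬ j < cs.length := by omega
    rw [pvARun, dif_neg hj']
    exact ⟨[pvEnd cs start], rfl⟩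
  | succ fuel ih =>
    intro j hj len isSp start acc
    by_cases h : j < cs.length
    · rw [pvARun, dif_pos h]
      by_cases hx : (isSp ^^ pvTyp cs j) = true
      · simp only [hx, if_true]
        exact ih (j + 1) (by omega) 1 (pvTyp cs j) start acc
      · simp only [Bool.not_eq_true] at hx
        simp only [hx, Bool.false_eq_true, if_false]
        by_cases hc : len + 1 > m
        · rw [if_pos hc]
          obtain ⟨t, ht⟩ := ih (j + 1) (by omega) 1 (pvTyp cs j) ((j : Nat) : Int)
            (acc ++ [pvPiece cs start ((j : Nat) : Int)])
          exact ⟨[pvPiece cs start ((j : Nat) : Int)] ++ t, by rw [ht, List.append_assoc]⟩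
        · rw [if_neg hc]
          exact ih (j + 1) (by omega) (len + 1) (pvTyp cs j) start acc
    · rw [pvARun, dif_neg h]
      exact ⟨[pvEnd cs start], rfl⟩

lemma pvBCuts_nil_neg (cs : List Char) (m : Int) (hm : m < 0) :
    ∀ (fuel j rs : Nat), cs.length - j ≤ fuel → rs < j → rs < cs.length → pvBCuts cs m j rs = [] := by
  intro fuel
  induction fuel with
  | zero =>
    intro j rs hj hrj hrs
    have hj' : ¬ j < cs.length := by omega
    rw [pvBCuts, dif_neg hj']
    exact pvPyRange_nil_neg _ _ _ hm (by omega)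
  | succ fuel ih =>
    intro j rs hj hrj hrs
    by_cases h : j < cs.length
    · rw [pvBCuts, dif_pos h]
      by_cases hx : (pvTyp cs j != pvTyp cs rs) = true
      · simp only [hx, if_true]
        rw [pvPyRange_nil_neg _ _ _ hm (by omega), List.nil_append]
        exact ih (j + 1) j (by omega) (by omega) h
      · simp only [Bool.not_eq_true] at hx
        simp only [hx, Bool.false_eq_true, if_false]
        exact ih (j + 1) rs (by omega) (by omega) hrs
    · rw [pvBCuts, dif_neg h]
      exact pvPyRange_nil_neg _ _ _ hm (by omega)

-- ===== VERDICT (by name: the statement is the Claim_ definition above) =====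
theorem split_long_repetitions_py_spec : Claim_unchanged_split_long_repetitions_py := by
  intro s m _hDom hPre
  intro hnD
  by_cases h : s.toList = []
  · exact pvEmptyCase s m h
  · have hm0 : m ≠ 0 := by
      rcases hPre with hp | hp
      · exact hp
      · exact absurd hp h
    have hmneg : ¬ (m < 0 ∧ s.toList ≠ []) := hnD
    have hm : 1 ≤ m := by
      rcases lt_trichotomy m 0 with hlt | heq | hgt
      · exact absurd ⟨hlt, h⟩ hmneg
      · exact absurd heq hm0
      · omega
    exact pvEquivNonempty s m hm h

theorem split_long_repetitions_py_changed : Claim_changed_split_long_repetitions_py := by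
  unfold Claim_changed_split_long_repetitions_py
  decide

theorem split_long_repetitions_py_tight : Claim_exact_split_long_repetitions_py := by
  intro s m _hDom _hPre hD
  obtain ⟨hm, hne⟩ := hD
  have hlen : 0 < s.toList.length := List.length_pos_iff.mpr hne
  -- A's first emitted piece is the empty string
  have hA := pvA_eq_run s m
  rw [if_pos (by exact_mod_cast hlen)] at hA
  have hstep : pvARun s.toList m 0 0 (pvTyp s.toList 0) 0 []
      = pvARun s.toList m 1 1 (pvTyp s.toList 0) ((0 : Nat) : Int)
          ([] ++ [pvPiece s.toList 0 ((0 : Nat) : Int)]) := by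
    rw [pvARun, dif_pos hlen]
    have hx : xor (pvTyp s.toList 0) (pvTyp s.toList 0) = false := by simp
    simp only [hx, Bool.false_eq_true, if_false, zero_add]
    rw [if_pos (by omega : (1 : Int) > m)]
  obtain ⟨t, ht⟩ := pvARun_prefix s.toList m (s.toList.length) 1 (by omega) 1
    (pvTyp s.toList 0) ((0 : Nat) : Int) ([] ++ [pvPiece s.toList 0 ((0 : Nat) : Int)])
  have hpiece : pvPiece s.toList 0 ((0 : Nat) : Int) = "" := by
    simp [pvPiece, PySem.List.slice_to]
  have hAhead : (split_long_repetitions_py s m).head? = some "" := by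
    rw [hA, hstep, ht, hpiece]
    simp
  -- B is the single whole-string slice
  have hB : split_long_repetitions_py_alt s m = [pvEnd s.toList 0] := by
    rw [pvB_eq s m hne, pvBCuts_nil_neg s.toList m hm (s.toList.length) 1 0 (by omega) (by omega) hlen]
    rfl
  intro heq
  have hhead := congrArg List.head? heq
  rw [hAhead, hB] at hhead
  simp only [List.head?_cons, Option.some.injEq] at hhead
  have htl : (pvEnd s.toList 0).toList = s.toList := by
    simp [pvEnd, PySem.List.slice_from]
  rw [← hhead] at htl
  exact hne (by simpa using htl.symm)
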